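-- pv_equiv track=rewrite | github.com/Stavitskii/HWS | 06_1HW/carpet.py | draw_carpet
-- ===== SOURCE A (Python) =====
-- def carpet_string_ends(arg):
--     result = ""
--     length = range(arg)
--     for i in length:
--         if i == 0:
--             result += "▓"
--         elif i>0 and i<(len(length)-1):
--             result+= "░"
--         else:
--             result+="▓"
--     return result
--
-- def carpet_string(arg):
--     result = ""
--     length = range(arg)
--     for i in length:
--         if i == 0:
--             result += "▓"
--         elif i == 1 and len(length)>2:
--             result += "░"
--         elif i>1 and i<(len(length)-2):
--             result+= "▒"
--         elif i == (len(length)-2):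
--             result += "░"
--         else:
--             result+="▓"
--     return result
--
-- def draw_carpet(w,h):
--     lengs_h = len(range(h))
--     result = ""
--     for i in range(h):
--         if i == 0:
--             result += carpet_string_ends(w)
--             result +="\n"
--         elif i>0 and i<(lengs_h-1):
--             result += carpet_string(w)
--             result += "\n"
--         else:
--             result += carpet_string_ends(w)
--     return result
-- ===== SOURCE B (Python) =====
-- def draw_carpet(w, h):
--     if h <= 0:
--         return ""
--     ends = "" if w <= 0 else ("▓" if w == 1 else "▓" + "░" * (w - 2) + "▓")
--     mid = ends if w <= 2 else ("▓░▓" if w == 3 else "▓░" + "▒" * (w - 4) + "░▓")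
--     return ends + "\n" + (mid + "\n") * (h - 2) + (ends if h >= 2 else "")
-- ===== Notes on version B (the rewrite author's own statement) =====
-- stated objective: simpler
-- what changed: B computes the two distinct row patterns once as closed-form strings (repetition of a fill character between fixed borders) and assembles the carpet by string repetition, replacing A's nested per-row character-by-character loops with index comparisons.
import Mathlib
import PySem

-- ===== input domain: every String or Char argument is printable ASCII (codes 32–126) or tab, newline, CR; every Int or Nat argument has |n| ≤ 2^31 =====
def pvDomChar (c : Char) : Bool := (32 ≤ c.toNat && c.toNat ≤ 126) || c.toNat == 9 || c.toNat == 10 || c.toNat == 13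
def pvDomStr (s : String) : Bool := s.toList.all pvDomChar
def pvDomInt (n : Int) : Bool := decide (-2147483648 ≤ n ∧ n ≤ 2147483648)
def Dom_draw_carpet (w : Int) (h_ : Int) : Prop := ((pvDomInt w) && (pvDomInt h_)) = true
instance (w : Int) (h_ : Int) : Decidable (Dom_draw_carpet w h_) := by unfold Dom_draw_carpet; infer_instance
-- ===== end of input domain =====

-- B builds the two distinct row strings once in closed form and lays the carpet out by
-- repetition, instead of A's per-row character-by-character loops (objective: simpler).
-- ===== PORT A =====
-- strings are built on the List Char side (PySem convention); String.ofList wraps the result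

def carpet_string_ends (arg : Int) : List Char :=
  (PySem.List.pyRange 0 arg 1).foldl (fun result i =>
    if i = 0 then result ++ ['▓']
    else if 0 < i ∧ i < ((PySem.List.pyRange 0 arg 1).length : Int) - 1 then result ++ ['░']
    else result ++ ['▓']) []

def carpet_string (arg : Int) : List Char :=
  (PySem.List.pyRange 0 arg 1).foldl (fun result i =>
    if i = 0 then result ++ ['▓']
    else if i = 1 ∧ ((PySem.List.pyRange 0 arg 1).length : Int) > 2 then result ++ ['░']
    else if 1 < i ∧ i < ((PySem.List.pyRange 0 arg 1).length : Int) - 2 then result ++ ['▒']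
    else if i = ((PySem.List.pyRange 0 arg 1).length : Int) - 2 then result ++ ['░']
    else result ++ ['▓']) []

def draw_carpet (w : Int) (h_ : Int) : String :=
  let lengs_h : Int := ((PySem.List.pyRange 0 h_ 1).length : Int)
  String.ofList ((PySem.List.pyRange 0 h_ 1).foldl (fun result i =>
    if i = 0 then result ++ carpet_string_ends w ++ ['\n']
    else if 0 < i ∧ i < lengs_h - 1 then result ++ carpet_string w ++ ['\n']
    else result ++ carpet_string_ends w) [])

-- ===== PORT B =====
def endsRow (w : Int) : List Char :=
  if w ≤ 0 then [] else if w = 1 then ['▓']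
  else '▓' :: List.replicate (w - 2).toNat '░' ++ ['▓']

def midRow (w : Int) : List Char :=
  if w ≤ 2 then endsRow w else if w = 3 then ['▓', '░', '▓']
  else '▓' :: '░' :: List.replicate (w - 4).toNat '▒' ++ ['░', '▓']

def draw_carpet_alt (w : Int) (h_ : Int) : String :=
  if h_ ≤ 0 then ""
  else String.ofList (endsRow w ++ '\n' ::
        ((List.replicate (h_ - 2).toNat (midRow w ++ ['\n'])).flatten ++
         (if 2 ≤ h_ then endsRow w else [])))

-- ===== PRECONDITION & SPEC =====
def Spec_draw_carpet (w : Int) (h_ : Int) (out : String) : Prop := out = draw_carpet_alt w h_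
instance (w : Int) (h_ : Int) (out : String) : Decidable (Spec_draw_carpet w h_ out) := by unfold Spec_draw_carpet; infer_instance

-- ===== CLAIM (what is proved, stated in full; the proofs are below) =====
def Claim_equal_draw_carpet : Prop := ∀ (w : Int) (h_ : Int), Dom_draw_carpet w h_ → Spec_draw_carpet w h_ (draw_carpet w h_)

-- ===== LEMMAS AND PROOFS =====

-- a loop over range m that emits one value at index 0 and another everywhere else
theorem map_range_ite_zero {α : Type} (a b : α) (m : Nat) (hm : 1 ≤ m) :
    (List.range m).map (fun k => if k = 0 then a else b) = a :: List.replicate (m - 1) b := by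
  induction m with
  | zero => omega
  | succ n ih =>
    rcases Nat.eq_or_lt_of_le hm with h | h
    · simp [← h]
    · rw [List.range_succ, List.map_append, ih (by omega)]
      have hn : n ≠ 0 := by omega
      simp [hn, ← List.replicate_succ']
      omega

-- a loop over range m emitting a at 0, b at 1 and c everywhere else
theorem map_range_ite_zero_one {α : Type} (a b c : α) (m : Nat) (hm : 2 ≤ m) :
    (List.range m).map (fun k => if k = 0 then a else if k = 1 then b else c) =
      a :: b :: List.replicate (m - 2) c := by
  induction m with
  | zero => omega
  | succ n ih =>
    rcases Nat.eq_or_lt_of_le hm with h | h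
    · simp [← h, List.range_succ]
    · rw [List.range_succ, List.map_append, ih (by omega)]
      have h0 : n ≠ 0 := by omega
      have h1 : n ≠ 1 := by omega
      simp [h0, h1, ← List.replicate_succ']
      omega

theorem carpet_string_ends_eq (w : Int) : carpet_string_ends w = endsRow w := by
  unfold carpet_string_ends
  have hb : (fun (result : List Char) (i : Int) =>
      if i = 0 then result ++ ['▓']
      else if 0 < i ∧ i < ((PySem.List.pyRange 0 w 1).length : Int) - 1 then result ++ ['░']
      else result ++ ['▓'])
    = fun result i => result ++ [if i = 0 then '▓'
        else if 0 < i ∧ i < ((PySem.List.pyRange 0 w 1).length : Int) - 1 then '░' else '▓'] := by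
    funext r i; split_ifs <;> rfl
  rw [hb, PySem.List.foldl_append_singleton_eq_map, List.nil_append]
  rw [PySem.List.length_pyRange_one, PySem.List.pyRange_one, List.map_map]
  by_cases h0 : w ≤ 0
  · rw [show (w - 0).toNat = 0 from by omega]
    simp [endsRow, h0]
  · by_cases h1 : w = 1
    · subst h1; decide
    · have hw2 : 2 ≤ w := by omega
      set n := (w - 0).toNat with hn
      have hn2 : 2 ≤ n := by omega
      have hrs : List.range n = List.range (n-1) ++ [n-1] := by
        conv_lhs => rw [show n = (n-1) + 1 by omega, List.range_succ]
      rw [hrs, List.map_append]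
      have hmid : List.map ((fun i => if i = 0 then '▓'
            else if 0 < i ∧ i < ((n:Int)) - 1 then '░' else '▓') ∘ (fun k : Nat => (0:Int) + k))
          (List.range (n-1))
          = List.map (fun k : Nat => if k = 0 then '▓' else '░') (List.range (n-1)) := by
        apply List.map_congr_left
        intro k hk
        rw [List.mem_range] at hk
        simp only [Function.comp, zero_add]
        by_cases hk0 : k = 0
        · simp [hk0]
        · have h2 : (0:Int) < k ∧ (k:Int) < (n:Int) - 1 := by constructor <;> omega
          simp [h2, hk0]
      rw [hmid, map_range_ite_zero _ _ _ (by omega)]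
      have hlast : ((fun i => if i = 0 then '▓'
          else if 0 < i ∧ i < ((n:Int)) - 1 then '░' else '▓') ∘ (fun k : Nat => (0:Int) + k)) (n-1) = '▓' := by
        simp only [Function.comp, zero_add]
        split_ifs with a b
        · rfl
        · exact absurd b.2 (by omega)
        · rfl
      simp only [List.map_cons, List.map_nil, hlast]
      have he : n - 1 - 1 = (w - 2).toNat := by omega
      simp [endsRow, h0, h1, he]

theorem carpet_string_eq (w : Int) : carpet_string w = midRow w := by
  unfold carpet_string
  have hb : (fun (result : List Char) (i : Int) =>
      if i = 0 then result ++ ['▓']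
      else if i = 1 ∧ ((PySem.List.pyRange 0 w 1).length : Int) > 2 then result ++ ['░']
      else if 1 < i ∧ i < ((PySem.List.pyRange 0 w 1).length : Int) - 2 then result ++ ['▒']
      else if i = ((PySem.List.pyRange 0 w 1).length : Int) - 2 then result ++ ['░']
      else result ++ ['▓'])
    = fun result i => result ++ [if i = 0 then '▓'
        else if i = 1 ∧ ((PySem.List.pyRange 0 w 1).length : Int) > 2 then '░'
        else if 1 < i ∧ i < ((PySem.List.pyRange 0 w 1).length : Int) - 2 then '▒'
        else if i = ((PySem.List.pyRange 0 w 1).length : Int) - 2 then '░' else '▓'] := by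
    funext r i; split_ifs <;> rfl
  rw [hb, PySem.List.foldl_append_singleton_eq_map, List.nil_append]
  rw [PySem.List.length_pyRange_one, PySem.List.pyRange_one, List.map_map]
  by_cases h0 : w ≤ 0
  · rw [show (w - 0).toNat = 0 from by omega]
    simp [midRow, endsRow, h0, show w ≤ 2 from by omega]
  · by_cases h1 : w = 1
    · subst h1; decide
    · by_cases h2 : w = 2
      · subst h2; decide
      · by_cases h3 : w = 3
        · subst h3; decide
        · have hw4 : 4 ≤ w := by omega
          set n := (w - 0).toNat with hn
          have hn4 : 4 ≤ n := by omega
          have hrs : List.range n = List.range (n-2) ++ [n-2, n-1] := by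
            conv_lhs => rw [show n = (n-1) + 1 by omega, List.range_succ,
              show n - 1 = (n-2) + 1 by omega, List.range_succ]
            simp [List.append_assoc]
            omega
          rw [hrs, List.map_append]
          have hmid : List.map ((fun i => if i = 0 then '▓'
                else if i = 1 ∧ ((n:Int)) > 2 then '░'
                else if 1 < i ∧ i < ((n:Int)) - 2 then '▒'
                else if i = ((n:Int)) - 2 then '░' else '▓') ∘ (fun k : Nat => (0:Int) + k))
              (List.range (n-2))
              = List.map (fun k : Nat => if k = 0 then '▓' else if k = 1 then '░' else '▒')
                  (List.range (n-2)) := by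
            apply List.map_congr_left
            intro k hk
            rw [List.mem_range] at hk
            simp only [Function.comp, zero_add]
            by_cases hk0 : k = 0
            · simp [hk0]
            · by_cases hk1 : k = 1
              · have hg : ((1:Int)) = 1 ∧ ((n:Int)) > 2 := ⟨rfl, by omega⟩
                simp [hk1, hg.2]
              · have hc : (1:Int) < k ∧ (k:Int) < (n:Int) - 2 := by constructor <;> omega
                have hik0 : ((k:Int)) ≠ 0 := by omega
                have hik1 : ((k:Int)) ≠ 1 := by omega
                simp [hik1, hc, hk0, hk1]
          rw [hmid, map_range_ite_zero_one _ _ _ _ (by omega)]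
          have ha : ((fun i => if i = 0 then '▓'
                else if i = 1 ∧ ((n:Int)) > 2 then '░'
                else if 1 < i ∧ i < ((n:Int)) - 2 then '▒'
                else if i = ((n:Int)) - 2 then '░' else '▓') ∘ (fun k : Nat => (0:Int) + k)) (n-2) = '░' := by
            simp only [Function.comp, zero_add]
            split_ifs with c1 c2 c3 c4
            · exact absurd c1 (by omega)
            · rfl
            · exact absurd c3 (by omega)
            · rfl
            · exact absurd (by omega : ((↑(n-2):Int)) = (n:Int) - 2) c4
          have hz : ((fun i => if i = 0 then '▓'
                else if i = 1 ∧ ((n:Int)) > 2 then '░'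
                else if 1 < i ∧ i < ((n:Int)) - 2 then '▒'
                else if i = ((n:Int)) - 2 then '░' else '▓') ∘ (fun k : Nat => (0:Int) + k)) (n-1) = '▓' := by
            simp only [Function.comp, zero_add]
            split_ifs with c1 c2 c3 c4
            · exact absurd c1 (by omega)
            · exact absurd c2 (by omega)
            · exact absurd c3 (by omega)
            · exact absurd c4 (by omega)
            · rfl
          simp only [List.map_cons, List.map_nil, ha, hz]
          have he : n - 2 - 2 = (w - 4).toNat := by omega
          have hw2 : ¬ w ≤ 2 := by omega
          simp [midRow, hw2, h3, he]

-- ===== VERDICT (by name: the statement is the Claim_ definition above) =====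
theorem draw_carpet_spec : Claim_equal_draw_carpet := by
  unfold Claim_equal_draw_carpet Spec_draw_carpet
  intro w h_ _
  unfold draw_carpet draw_carpet_alt
  have hb : (fun (result : List Char) (i : Int) =>
      if i = 0 then result ++ carpet_string_ends w ++ ['\n']
      else if 0 < i ∧ i < ((PySem.List.pyRange 0 h_ 1).length : Int) - 1 then result ++ carpet_string w ++ ['\n']
      else result ++ carpet_string_ends w)
    = fun result i => result ++ (if i = 0 then endsRow w ++ ['\n']
        else if 0 < i ∧ i < ((PySem.List.pyRange 0 h_ 1).length : Int) - 1 then midRow w ++ ['\n']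
        else endsRow w) := by
    funext r i
    split_ifs <;> simp [carpet_string_ends_eq, carpet_string_eq, List.append_assoc]
  simp only []
  rw [hb, PySem.List.foldl_append_eq_flatMap, List.nil_append,
    PySem.List.length_pyRange_one, PySem.List.pyRange_one]
  by_cases h0 : h_ ≤ 0
  · rw [show (h_ - 0).toNat = 0 from by omega]
    simp [h0]
  · by_cases h1 : h_ = 1
    · subst h1
      rw [show ((1:Int) - 0).toNat = 1 from rfl]
      simp [List.range_succ]
    · have hh2 : 2 ≤ h_ := by omega
      set n := (h_ - 0).toNat with hn
      have hn2 : 2 ≤ n := by omega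
      rw [List.flatMap_map, show List.range n = List.range (n-1) ++ [n-1] by
        conv_lhs => rw [show n = (n-1) + 1 by omega, List.range_succ]]
      rw [List.flatMap_append]
      simp only [zero_add, List.flatMap_cons, List.flatMap_nil, List.append_nil]
      have hflat : (List.range (n-1)).flatMap (fun a : Nat => if ((a:Int)) = 0 then endsRow w ++ ['\n']
            else if 0 < ((a:Int)) ∧ ((a:Int)) < ((n:Int)) - 1 then midRow w ++ ['\n'] else endsRow w)
          = ((endsRow w ++ ['\n']) :: List.replicate (n-2) (midRow w ++ ['\n'])).flatten := by
        rw [List.flatMap_def]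
        congr 1
        have hc : List.map (fun a : Nat => if ((a:Int)) = 0 then endsRow w ++ ['\n']
              else if 0 < ((a:Int)) ∧ ((a:Int)) < ((n:Int)) - 1 then midRow w ++ ['\n'] else endsRow w)
              (List.range (n-1))
            = List.map (fun k : Nat => if k = 0 then endsRow w ++ ['\n'] else midRow w ++ ['\n'])
                (List.range (n-1)) := by
          apply List.map_congr_left
          intro k hk
          rw [List.mem_range] at hk
          by_cases hk0 : k = 0
          · simp [hk0]
          · have hc2 : (0:Int) < k ∧ (k:Int) < (n:Int) - 1 := by constructor <;> omega
            simp [hk0, hc2]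
        rw [hc, map_range_ite_zero _ _ _ (by omega)]
        congr 2
      have hlast : (if ((↑(n-1):Int)) = 0 then endsRow w ++ ['\n']
            else if 0 < ((↑(n-1):Int)) ∧ ((↑(n-1):Int)) < ((n:Int)) - 1 then midRow w ++ ['\n']
            else endsRow w) = endsRow w := by
        split_ifs with c1 c2
        · exact absurd c1 (by omega)
        · exact absurd c2 (by omega)
        · rfl
      rw [hflat, hlast, if_neg h0, if_pos hh2,
        show (h_ - 2).toNat = n - 2 from by omega]
      simp [List.append_assoc]
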